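-- pv_equiv track=rewrite | github.com/depthfirst/pp-ambiguity | notebook_source.py | generate_annotated4tpls
-- ===== SOURCE A (Python) =====
-- def generate_annotated4tpls(tpls, dependencies):
--     for tpl in tpls:
--         tprep = tpl[2]
--         if tprep in dependencies:
--             #tdeps[tprep] = dependencies[tprep]
--             #continue
--             yield tpl, dependencies[tprep]
--         for prep,attachment in dependencies.items():
--             if prep[1]==tprep[1]:
--                 yield tpl, attachment
-- ===== SOURCE B (Python) =====
-- def generate_annotated4tpls(tpls, dependencies):
--     # stage 1: one pass over the dict, grouping attachments by prep[1] (items order kept)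
--     blocks = {}
--     for prep, attachment in dependencies.items():
--         blocks.setdefault(prep[1], []).append(attachment)
--     # stage 2: per tpl, assemble its whole block (exact head, then grouped matches) and emit it
--     for tpl in tpls:
--         tprep = tpl[2]
--         head = [dependencies[tprep]] if tprep in dependencies else []
--         for attachment in head + blocks.get(tprep[1], []):
--             yield tpl, attachment
-- ===== Notes on version B (the rewrite author's own statement) =====
-- stated objective: faster
-- what changed: B first groups all attachments by prep[1] in one pass over the dict, then for each tpl assembles its whole output block (exact-key head plus grouped matches) from two O(1) lookups, instead of A's rescan of every dependency item per tpl.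
import Mathlib
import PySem

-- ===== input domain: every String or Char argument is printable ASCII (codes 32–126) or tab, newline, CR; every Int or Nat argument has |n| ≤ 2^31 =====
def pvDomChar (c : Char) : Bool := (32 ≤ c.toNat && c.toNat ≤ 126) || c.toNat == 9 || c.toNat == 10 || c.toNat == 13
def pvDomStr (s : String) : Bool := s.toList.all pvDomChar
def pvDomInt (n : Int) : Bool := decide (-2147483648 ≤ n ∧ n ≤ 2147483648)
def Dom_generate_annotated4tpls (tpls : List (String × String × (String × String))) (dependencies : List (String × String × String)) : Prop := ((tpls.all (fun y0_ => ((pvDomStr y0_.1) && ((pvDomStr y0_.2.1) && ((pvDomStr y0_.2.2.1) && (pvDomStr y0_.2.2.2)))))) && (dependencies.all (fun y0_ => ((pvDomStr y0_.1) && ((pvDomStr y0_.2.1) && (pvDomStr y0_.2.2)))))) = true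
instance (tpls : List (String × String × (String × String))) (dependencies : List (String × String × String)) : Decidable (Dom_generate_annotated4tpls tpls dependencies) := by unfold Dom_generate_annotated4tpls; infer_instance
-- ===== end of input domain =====

-- B replaces A's per-tpl scan of all dependency items with a one-pass grouping of
-- attachments by prep's second component, then emits each tpl's block by lookup
-- (asymptotic speed-up, O(T*D) -> O(T+D+out)).


-- ===== PORT A =====
-- the dict parameter arrives as an association list; as in Python's dict(...), later
-- duplicates overwrite in place (PySem.Dict.ofList)
def generate_annotated4tpls (tpls : List (String × String × (String × String))) (dependencies : List (String × String × String)) : List ((String × String × (String × String)) × String) :=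
  let deps : PySem.Dict (String × String) String :=
    PySem.Dict.ofList (dependencies.map (fun d => ((d.1, d.2.1), d.2.2)))
  tpls.foldl (fun acc tpl =>
    let tprep := tpl.2.2
    let acc := match deps.get? tprep with
      | some v => acc ++ [(tpl, v)]      -- if tprep in dependencies: yield tpl, dependencies[tprep]
      | none => acc
    deps.items.foldl (fun acc pa =>      -- for prep, attachment in dependencies.items():
      if pa.1.2 == tprep.2 then acc ++ [(tpl, pa.2)] else acc) acc) []

-- ===== PORT B =====
-- stage 1 of Source B: blocks.setdefault(prep[1], []).append(attachment), one pass
def pvGroup : List ((String × String) × String) → PySem.Dict String (List String) → PySem.Dict String (List String)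
  | [], m => m
  | pa :: rest, m => pvGroup rest (m.modify pa.1.2 [] (· ++ [pa.2]))

-- stage 2 of Source B: per tpl, assemble head + grouped matches and emit the block
def pvEmit (deps : PySem.Dict (String × String) String) (blocks : PySem.Dict String (List String)) :
    List (String × String × (String × String)) → List ((String × String × (String × String)) × String)
  | [] => []
  | tpl :: rest =>
      let tprep := tpl.2.2
      let head : List String := match deps.get? tprep with
        | some v => [v]
        | none => []
      (head ++ blocks.getD tprep.2 []).map (fun attachment => (tpl, attachment))
        ++ pvEmit deps blocks rest

def generate_annotated4tpls_alt (tpls : List (String × String × (String × String))) (dependencies : List (String × String × String)) : List ((String × String × (String × String)) × String) :=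
  let deps : PySem.Dict (String × String) String :=
    PySem.Dict.ofList (dependencies.map (fun d => ((d.1, d.2.1), d.2.2)))
  pvEmit deps (pvGroup deps.items PySem.Dict.empty) tpls

-- ===== PRECONDITION & SPEC =====
def Spec_generate_annotated4tpls (tpls : List (String × String × (String × String))) (dependencies : List (String × String × String)) (out : List ((String × String × (String × String)) × String)) : Prop := out = generate_annotated4tpls_alt tpls dependencies
instance (tpls : List (String × String × (String × String))) (dependencies : List (String × String × String)) (out : List ((String × String × (String × String)) × String)) : Decidable (Spec_generate_annotated4tpls tpls dependencies out) := by unfold Spec_generate_annotated4tpls; infer_instance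

-- ===== CLAIM =====
def Claim_equal_generate_annotated4tpls : Prop := ∀ (tpls : List (String × String × (String × String))) (dependencies : List (String × String × String)), Dom_generate_annotated4tpls tpls dependencies → Spec_generate_annotated4tpls tpls dependencies (generate_annotated4tpls tpls dependencies)

-- ===== LEMMAS AND PROOFS =====

-- B's grouping recursion is the fold PySem characterises
theorem pvGroup_eq_foldl (items : List ((String × String) × String)) (m : PySem.Dict String (List String)) :
    pvGroup items m = items.foldl (fun m pa => m.modify pa.1.2 [] (· ++ [pa.2])) m := by
  induction items generalizing m with
  | nil => rfl
  | cons pa rest ih => simp [pvGroup, ih]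

-- the grouped index looked up at c = exactly the attachments whose key's second component is c
theorem pvGroup_getD (items : List ((String × String) × String)) (c : String) :
    (pvGroup items PySem.Dict.empty).getD c []
      = (items.filter (fun pa => pa.1.2 == c)).map (·.2) := by
  rw [pvGroup_eq_foldl]
  have h1 : (items.foldl (fun m pa => m.modify pa.1.2 [] (· ++ [pa.2])) PySem.Dict.empty)
      = ((items.map (fun pa => (pa.1.2, pa.2))).foldl
          (fun m p => m.modify p.1 [] (· ++ [p.2])) PySem.Dict.empty) := by
    rw [List.foldl_map]
  rw [h1, PySem.Dict.getD_foldl_modify_append]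
  simp [PySem.Dict.getD_empty, List.filter_map, List.map_map, Function.comp_def]

-- one step of A's outer loop appends exactly B's per-tpl block
theorem stepA (deps : PySem.Dict (String × String) String)
    (acc : List ((String × String × (String × String)) × String))
    (tpl : String × String × (String × String)) :
    (deps.items.foldl (fun acc pa =>
        if pa.1.2 == tpl.2.2.2 then acc ++ [(tpl, pa.2)] else acc)
      (match deps.get? tpl.2.2 with
        | some v => acc ++ [(tpl, v)]
        | none => acc))
    = acc ++ (((match deps.get? tpl.2.2 with
        | some v => [v]
        | none => []) ++ (pvGroup deps.items PySem.Dict.empty).getD tpl.2.2.2 []).map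
          (fun attachment => (tpl, attachment))) := by
  rw [PySem.List.foldl_append_if (p := fun pa => pa.1.2 == tpl.2.2.2)
        (f := fun pa => (tpl, pa.2)) (l := deps.items),
      pvGroup_getD, List.map_append, List.map_map]
  cases deps.get? tpl.2.2 <;> simp [Function.comp_def]

-- A's fold from any accumulator is that accumulator followed by B's emission
theorem foldA_eq (deps : PySem.Dict (String × String) String)
    (tpls : List (String × String × (String × String)))
    (acc : List ((String × String × (String × String)) × String)) :
    tpls.foldl (fun acc tpl =>
      let tprep := tpl.2.2
      let acc := match deps.get? tprep with
        | some v => acc ++ [(tpl, v)]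
        | none => acc
      deps.items.foldl (fun acc pa =>
        if pa.1.2 == tprep.2 then acc ++ [(tpl, pa.2)] else acc) acc) acc
    = acc ++ pvEmit deps (pvGroup deps.items PySem.Dict.empty) tpls := by
  induction tpls generalizing acc with
  | nil => simp [pvEmit]
  | cons tpl rest ih =>
      rw [List.foldl_cons]
      simp only []
      rw [stepA, ih, pvEmit, List.append_assoc]

-- ===== VERDICT =====
theorem generate_annotated4tpls_spec : Claim_equal_generate_annotated4tpls := by
  intro tpls dependencies _
  unfold Spec_generate_annotated4tpls generate_annotated4tpls generate_annotated4tpls_alt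
  rw [foldA_eq, List.nil_append]
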